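-- pv_equiv track=rewrite | github.com/irinaexzellent/algorithms_part3 | L. two_bikes/two_bikes.py | buying_bikes
-- ===== SOURCE A (Python) =====
-- def buying_bikes(cumulations, x, left, right):
--     if cumulations[0] >= x:
--         return 1
--     if cumulations[1] >= x:
--         return 2
--     if x > cumulations[right]:
--         return -1
--     elif right == left:
--         return left + 1
--     mid = int((left + right) / 2)
--     if cumulations[mid] < x:
--         return buying_bikes(cumulations, x, mid+1, right)
--     else:
--         return buying_bikes(cumulations, x, left, mid)
-- ===== SOURCE B (Python) =====
-- def buying_bikes(cumulations, x, left, right):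
--     # C++-style lower_bound: a base index plus a shrinking count,
--     # the fixed guards and the x > cumulations[right] test done once up front
--     if cumulations[0] >= x:
--         return 1
--     if cumulations[1] >= x:
--         return 2
--     if x > cumulations[right]:
--         return -1
--     base, n = left, right - left
--     while n > 0:
--         half = n // 2
--         if cumulations[base + half] < x:
--             base += half + 1
--             n -= half + 1
--         else:
--             n = half
--     return base + 1
-- ===== Notes on version B (the rewrite author's own statement) =====
-- stated objective: alternative
-- what changed: A's recursive binary search on a [left,right] window (re-evaluating the two fixed guards and the x>cumulations[right] test at every level, with a float-based int((left+right)/2) midpoint) becomes a C++-style lower_bound loop over a base index and a shrinking count n=right-left with probe base+n//2, all guards checked once up front; the probe sequence is identical since (l+r)//2 = l+(r-l)//2.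
-- outside the precondition, e.g. on buying_bikes([4, 2, 8], 7, -3, 2): A returns 3, B returns 0; on buying_bikes([0, 3, 9, 7], 7, -4, 3): A returns 3, B returns -1
import Mathlib
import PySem

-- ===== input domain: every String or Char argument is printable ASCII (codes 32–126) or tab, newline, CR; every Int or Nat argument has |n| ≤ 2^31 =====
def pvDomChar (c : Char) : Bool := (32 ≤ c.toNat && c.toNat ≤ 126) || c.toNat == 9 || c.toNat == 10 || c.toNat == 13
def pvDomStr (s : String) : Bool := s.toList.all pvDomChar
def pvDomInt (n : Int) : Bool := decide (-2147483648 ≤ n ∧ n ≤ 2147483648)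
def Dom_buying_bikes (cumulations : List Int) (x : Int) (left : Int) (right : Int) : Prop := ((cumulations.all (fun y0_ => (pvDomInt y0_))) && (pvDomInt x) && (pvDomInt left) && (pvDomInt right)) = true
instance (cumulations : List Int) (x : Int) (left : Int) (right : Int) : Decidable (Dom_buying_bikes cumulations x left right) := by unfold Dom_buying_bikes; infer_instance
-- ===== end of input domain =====

-- B replaces A's recursive [left,right]-window binary search by a C++-style lower_bound
-- loop over a base index and a shrinking count, with all guards checked once up front.

-- ===== PORT A =====
-- A's recursion, with a fuel parameter making it total; within Pre_ the fuel
-- (right-left).toNat+1 exceeds the recursion depth, so this is exact there.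
-- 'mid = int((left+right)/2)' truncates toward zero (exact float for |left+right| ≤ 2^32),
-- ported as Int.tdiv (truncating division).
def buyingBikesGoA (cumulations : List Int) (x : Int) : Nat → Int → Int → Int
  | 0, _, _ => 0
  | Nat.succ f, left, right =>
    if (PySem.List.pyGet? cumulations 0).getD 0 ≥ x then 1
    else if (PySem.List.pyGet? cumulations 1).getD 0 ≥ x then 2
    else if x > (PySem.List.pyGet? cumulations right).getD 0 then -1
    else if right = left then left + 1
    else
      let mid := Int.tdiv (left + right) 2
      if (PySem.List.pyGet? cumulations mid).getD 0 < x then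
        buyingBikesGoA cumulations x f (mid + 1) right
      else
        buyingBikesGoA cumulations x f left mid

def buying_bikes (cumulations : List Int) (x : Int) (left : Int) (right : Int) : Int :=
  buyingBikesGoA cumulations x ((right - left).toNat + 1) left right

-- ===== PORT B =====
-- B's 'while n > 0' lower_bound loop: state is (base, n); n is a Python int that is
-- only positive while the loop runs, ported as the Nat (right-left).toNat (the loop body
-- is never entered when right - left ≤ 0, exactly as in Python).
def buyingBikesGoB (cumulations : List Int) (x : Int) (base : Int) (n : Nat) : Int :=
  if h : n = 0 then base + 1
  else
    let half := n / 2
    if (PySem.List.pyGet? cumulations (base + (half : Int))).getD 0 < x then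
      buyingBikesGoB cumulations x (base + half + 1) (n - half - 1)
    else
      buyingBikesGoB cumulations x base half
termination_by n
decreasing_by all_goals omega

def buying_bikes_alt (cumulations : List Int) (x : Int) (left : Int) (right : Int) : Int :=
  if (PySem.List.pyGet? cumulations 0).getD 0 ≥ x then 1
  else if (PySem.List.pyGet? cumulations 1).getD 0 ≥ x then 2
  else if x > (PySem.List.pyGet? cumulations right).getD 0 then -1
  else buyingBikesGoB cumulations x left (right - left).toNat

-- ===== PRECONDITION & SPEC =====
-- Pre_ admits every input that one of A's early guards answers (indices 0/1/right in
-- Python's range, possibly negative) plus the proper binary-search window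
-- 0 ≤ left ≤ right < len; it excludes inputs where Python A raises IndexError or where
-- the recursion is reached with a window it cannot shrink (negative or crossed bounds),
-- on which A either raises RecursionError or returns via negative-index wraparound and a
-- truncating int(/2) midpoint.
def Pre_buying_bikes (cumulations : List Int) (x : Int) (left : Int) (right : Int) : Prop :=
  (1 ≤ cumulations.length ∧ (PySem.List.pyGet? cumulations 0).getD 0 ≥ x) ∨
  (2 ≤ cumulations.length ∧ PySem.Raise.InRange cumulations.length right ∧
    ((PySem.List.pyGet? cumulations 0).getD 0 ≥ x ∨
     (PySem.List.pyGet? cumulations 1).getD 0 ≥ x ∨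
     x > (PySem.List.pyGet? cumulations right).getD 0 ∨
     right = left ∨
     (0 ≤ left ∧ left ≤ right)))
instance (cumulations : List Int) (x : Int) (left : Int) (right : Int) : Decidable (Pre_buying_bikes cumulations x left right) := by unfold Pre_buying_bikes; infer_instance

def pvWitness_buying_bikes : List Int × Int × Int × Int := ([1, 2, 3], 3, 0, 2)

def Spec_buying_bikes (cumulations : List Int) (x : Int) (left : Int) (right : Int) (out : Int) : Prop := out = buying_bikes_alt cumulations x left right
instance (cumulations : List Int) (x : Int) (left : Int) (right : Int) (out : Int) : Decidable (Spec_buying_bikes cumulations x left right out) := by unfold Spec_buying_bikes; infer_instance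

-- ===== CLAIM (what is proved, stated in full; the proofs are below) =====
def Claim_equal_buying_bikes : Prop := ∀ (cumulations : List Int) (x : Int) (left : Int) (right : Int), Dom_buying_bikes cumulations x left right → Pre_buying_bikes cumulations x left right → Spec_buying_bikes cumulations x left right (buying_bikes cumulations x left right)

-- ===== LEMMAS AND PROOFS =====

-- A's recursion and B's lower_bound loop make the same probe sequence:
-- int((l+r)/2) = l + (r-l)//2 for 0 ≤ l ≤ r, and the invariant x ≤ cumulations[r]
-- keeps A's re-checked guards false.
theorem buyingBikes_go_eq (cumulations : List Int) (x : Int)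
    (h0 : ¬ (PySem.List.pyGet? cumulations 0).getD 0 ≥ x)
    (h1 : ¬ (PySem.List.pyGet? cumulations 1).getD 0 ≥ x) :
    ∀ (f : Nat) (left right : Int), 0 ≤ left → left ≤ right →
      ¬ x > (PySem.List.pyGet? cumulations right).getD 0 → right - left < (f : Int) →
      buyingBikesGoA cumulations x f left right =
        buyingBikesGoB cumulations x left (right - left).toNat := by
  intro f
  induction f with
  | zero => intro l r _ _ _ hf; omega
  | succ f ih =>
    intro l r hl hlr hx hf
    rw [buyingBikesGoB]
    simp only [buyingBikesGoA, h0, h1, hx, if_false]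
    by_cases heq : r = l
    · simp [heq]
    · have hlt : l < r := by omega
      have hn0 : (r - l).toNat ≠ 0 := by omega
      simp only [heq, if_false, hn0, dif_neg, not_false_iff]
      set half : Nat := (r - l).toNat / 2 with hhalf
      have hhI : (half : Int) = (r - l) / 2 := by omega
      have hmid : Int.tdiv (l + r) 2 = l + (half : Int) := by
        rw [Int.tdiv_eq_ediv_of_nonneg (by omega)]
        omega
      rw [hmid]
      have hmr : l + (half : Int) < r := by omega
      by_cases hc : (PySem.List.pyGet? cumulations (l + (half : Int))).getD 0 < x
      · simp only [hc, if_true]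
        have := ih (l + (half : Int) + 1) r (by omega) (by omega) hx (by omega)
        rw [this]
        congr 1
        omega
      · simp only [hc, if_false]
        have := ih l (l + (half : Int)) hl (by omega) hc (by omega)
        rw [this]
        congr 1
        omega

-- ===== VERDICT (by name: the statement is the Claim_ definition above) =====
theorem buying_bikes_spec : Claim_equal_buying_bikes := by
  intro c x l r _ hpre
  unfold Spec_buying_bikes buying_bikes buying_bikes_alt
  by_cases h0 : (PySem.List.pyGet? c 0).getD 0 ≥ x
  · simp [buyingBikesGoA, h0]
  · by_cases h1 : (PySem.List.pyGet? c 1).getD 0 ≥ x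
    · simp [buyingBikesGoA, h0, h1]
    · simp only [h0, h1, if_false]
      by_cases hx : x > (PySem.List.pyGet? c r).getD 0
      · simp [buyingBikesGoA, h0, h1, hx]
      · simp only [hx, if_false]
        by_cases heq : r = l
        · subst heq
          rw [buyingBikesGoB]
          simp [buyingBikesGoA, h0, h1, hx]
        · have hw : 0 ≤ l ∧ l ≤ r := by
            unfold Pre_buying_bikes at hpre
            rcases hpre with ⟨_, h⟩ | ⟨_, _, h | h | h | h | h⟩ <;> first | exact h | omega
          exact buyingBikes_go_eq c x h0 h1 _ l r hw.1 hw.2 hx (by omega)
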